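-- pv_equiv track=rewrite | github.com/sergey-automation/ocr-rag-pipeline | scripts/make_chunks_full.py | bucket_label_for_chunk_len
-- ===== SOURCE A (Python) =====
-- CHUNK_LEN_BUCKETS = (
--     (20, 49, "20-49"),
--     (50, 99, "50-99"),
--     (100, 499, "100-499"),
--     (500, 999, "500-999"),
--     (1000, None, "1000+"),
-- )
--
-- def bucket_label_for_chunk_len(text_len: int) -> str:
--     """Возвращает название диапазона длины чанка."""
--     for start, end, label in CHUNK_LEN_BUCKETS:
--         if text_len < start:
--             continue
--         if end is not None and text_len > end:
--             continue
--         return label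
--     return "OUT_OF_RANGE"
-- ===== SOURCE B (Python) =====
-- import bisect
--
-- _BOUNDS = [20, 50, 100, 500, 1000]
-- _LABELS = ["OUT_OF_RANGE", "20-49", "50-99", "100-499", "500-999", "1000+"]
--
-- def bucket_label_for_chunk_len(text_len: int) -> str:
--     return _LABELS[bisect.bisect_right(_BOUNDS, text_len)]
-- ===== Notes on version B (the rewrite author's own statement) =====
-- stated objective: idiomatic
-- what changed: Replaced the linear scan over (start, end, label) bucket tuples with a bisect_right binary-search index into a sorted boundary array and a parallel label array.
import Mathlib
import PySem

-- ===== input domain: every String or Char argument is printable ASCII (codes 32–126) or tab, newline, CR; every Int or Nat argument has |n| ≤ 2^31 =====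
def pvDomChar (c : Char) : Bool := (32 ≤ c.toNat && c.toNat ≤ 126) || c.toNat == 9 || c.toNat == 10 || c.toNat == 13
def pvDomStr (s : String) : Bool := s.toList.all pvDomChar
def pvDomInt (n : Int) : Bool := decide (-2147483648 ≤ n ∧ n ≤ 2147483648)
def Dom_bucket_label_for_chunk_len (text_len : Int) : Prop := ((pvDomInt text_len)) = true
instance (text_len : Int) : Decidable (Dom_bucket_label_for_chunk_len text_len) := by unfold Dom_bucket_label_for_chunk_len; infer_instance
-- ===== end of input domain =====

-- B replaces A's linear scan over bucket tuples by a bisect_right lookup into a boundary/label table (idiomatic).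


-- ===== PORT A =====
-- A's bucket table: (start, end, label); end = none means open-ended
def pvBuckets : List (Int × Option Int × String) :=
  [(20, some 49, "20-49"), (50, some 99, "50-99"), (100, some 499, "100-499"),
   (500, some 999, "500-999"), (1000, none, "1000+")]

-- the for-loop with its two `continue`s, as structural recursion over the bucket list
def pvLoopA (text_len : Int) : List (Int × Option Int × String) → String
  | [] => "OUT_OF_RANGE"
  | (start, end_, label) :: rest =>
    if text_len < start then pvLoopA text_len rest
    else match end_ with
      | some e => if text_len > e then pvLoopA text_len rest else label
      | none => label

def bucket_label_for_chunk_len (text_len : Int) : String :=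
  pvLoopA text_len pvBuckets

-- ===== PORT B =====
-- B: boundary table + bisect_right index into a parallel label table
def pvBounds : List Int := [20, 50, 100, 500, 1000]
def pvLabels : List String := ["OUT_OF_RANGE", "20-49", "50-99", "100-499", "500-999", "1000+"]

def bucket_label_for_chunk_len_alt (text_len : Int) : String :=
  PySem.List.pyGetD pvLabels (PySem.List.bisectRight pvBounds text_len : Int) ""

-- ===== PRECONDITION & SPEC =====
def Spec_bucket_label_for_chunk_len (text_len : Int) (out : String) : Prop := out = bucket_label_for_chunk_len_alt text_len
instance (text_len : Int) (out : String) : Decidable (Spec_bucket_label_for_chunk_len text_len out) := by unfold Spec_bucket_label_for_chunk_len; infer_instance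

-- ===== CLAIM (what is proved, stated in full; the proofs are below) =====
def Claim_equal_bucket_label_for_chunk_len : Prop := ∀ (text_len : Int), Dom_bucket_label_for_chunk_len text_len → Spec_bucket_label_for_chunk_len text_len (bucket_label_for_chunk_len text_len)

-- ===== LEMMAS AND PROOFS =====

-- ===== VERDICT (by name: the statement is the Claim_ definition above) =====
theorem bucket_label_for_chunk_len_spec : Claim_equal_bucket_label_for_chunk_len := by
  intro t _
  unfold Spec_bucket_label_for_chunk_len bucket_label_for_chunk_len bucket_label_for_chunk_len_alt
  simp only [pvBuckets, pvBounds, pvLabels]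
  by_cases h1 : t < 20
  · simp [pvLoopA, PySem.List.bisectRight, PySem.List.bisectRightLoop, PySem.List.pyGetD,
      h1, show t < 50 by omega, show t < 100 by omega, show t < 500 by omega,
      show t < 1000 by omega]
  · by_cases h2 : t < 50
    · simp [pvLoopA, PySem.List.bisectRight, PySem.List.bisectRightLoop, PySem.List.pyGetD,
        h1, h2, show ¬ t > 49 by omega, show t < 100 by omega]
    · by_cases h3 : t < 100
      · simp [pvLoopA, PySem.List.bisectRight, PySem.List.bisectRightLoop, PySem.List.pyGetD,
          h1, h2, h3, show t > 49 by omega, show ¬ t > 99 by omega]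
      · by_cases h4 : t < 500
        · simp [pvLoopA, PySem.List.bisectRight, PySem.List.bisectRightLoop, PySem.List.pyGetD,
            h1, h3, h4, show t > 49 by omega, show t > 99 by omega, show ¬ t > 499 by omega,
            show t < 1000 by omega]
        · by_cases h5 : t < 1000
          · simp [pvLoopA, PySem.List.bisectRight, PySem.List.bisectRightLoop, PySem.List.pyGetD,
              h1, h3, h4, h5, show t > 49 by omega, show t > 99 by omega, show t > 499 by omega,
              show ¬ t > 999 by omega]
          · simp [pvLoopA, PySem.List.bisectRight, PySem.List.bisectRightLoop, PySem.List.pyGetD,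
              h1, h3, h4, h5, show t > 49 by omega, show t > 99 by omega, show t > 499 by omega,
              show t > 999 by omega]
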